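-- pv_equiv track=rewrite | github.com/coldmanck/leetcode-python | 0841_Keys_and_Rooms.py | canVisitAllRooms
-- ===== SOURCE A (Python) =====
-- from typing import List
--
-- def canVisitAllRooms(rooms: List[List[int]]) -> bool:
--     # connected components: use DFS/BFS to traverse
--     from collections import deque
--     queue = deque([0])
--     visited = set([0])
--     while queue:
--         idx = queue.popleft()
--         for neighbor in rooms[idx]:
--             if neighbor not in visited:
--                 visited.add(neighbor)
--                 queue.append(neighbor)
--     return len(visited) == len(rooms)
-- ===== SOURCE B (Python) =====
-- from typing import List
--
-- def canVisitAllRooms(rooms: List[List[int]]) -> bool: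
--     # level-synchronous reachability: no queue, whole frontiers advanced by set algebra
--     visited = {0}
--     frontier = {0}
--     while frontier:
--         frontier = {k for i in frontier for k in rooms[i] if k not in visited}
--         visited |= frontier
--     return len(visited) == len(rooms)
-- ===== Notes on version B (the rewrite author's own statement) =====
-- stated objective: alternative
-- what changed: A's per-node BFS with a deque and one-at-a-time pops is replaced by a level-synchronous traversal that advances a whole frontier per iteration using set comprehensions and set union, with no queue at all; the answer only depends on the reached set, which is traversal-order independent.
import Mathlib
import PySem

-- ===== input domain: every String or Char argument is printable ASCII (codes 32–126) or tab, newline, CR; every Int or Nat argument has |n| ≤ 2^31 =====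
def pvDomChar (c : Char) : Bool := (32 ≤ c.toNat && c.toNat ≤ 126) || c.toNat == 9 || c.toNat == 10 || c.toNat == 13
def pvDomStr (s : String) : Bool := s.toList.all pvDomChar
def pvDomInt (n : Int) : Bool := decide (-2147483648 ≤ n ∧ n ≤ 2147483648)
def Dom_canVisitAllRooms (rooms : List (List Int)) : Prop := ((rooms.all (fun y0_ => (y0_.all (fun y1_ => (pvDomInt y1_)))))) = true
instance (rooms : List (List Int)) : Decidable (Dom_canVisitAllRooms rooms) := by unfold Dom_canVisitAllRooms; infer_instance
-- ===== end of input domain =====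

-- B replaces A's per-node BFS queue by level-synchronous set-algebra frontiers (alternative decomposition, same cost);
-- equivalence is about the return value (A mutates nothing observable).

-- ===== PORT A =====
-- termination-measure helper shared by the two loops: how many distinct ints occurring in rooms are not yet in s
def pvUnvis (rooms : List (List Int)) (s : PySem.Set Int) : Nat :=
  ((PySem.Set.ofList rooms.flatten).filter (fun x => !(PySem.Set.contains s x))).length

-- edge relation of the key graph (used by termination lemmas and the proofs below)
def pvEdge (rooms : List (List Int)) (i j : Int) : Prop :=
  ∃ row, PySem.List.pyGet? rooms i = some row ∧ j ∈ row

lemma pvUnvis_mono (rooms : List (List Int)) (s t : PySem.Set Int)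
    (h : ∀ x, x ∈ s → x ∈ t) : pvUnvis rooms t ≤ pvUnvis rooms s := by
  apply List.Sublist.length_le
  apply List.monotone_filter_right
  intro a ha
  simp at ha ⊢
  exact fun hs => ha (h a hs)

lemma pvUnvis_add_lt (rooms : List (List Int)) (s : PySem.Set Int) (nb : Int)
    (h1 : nb ∈ rooms.flatten) (h2 : nb ∉ s) :
    pvUnvis rooms (PySem.Set.add s nb) < pvUnvis rooms s := by
  have hsub : List.Sublist
      ((PySem.Set.ofList rooms.flatten).filter (fun x => !(PySem.Set.contains (PySem.Set.add s nb) x)))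
      ((PySem.Set.ofList rooms.flatten).filter (fun x => !(PySem.Set.contains s x))) := by
    apply List.monotone_filter_right
    intro a ha
    simp at ha ⊢
    exact ha.1
  have hmemp : nb ∈ (PySem.Set.ofList rooms.flatten).filter (fun x => !(PySem.Set.contains s x)) := by
    refine List.mem_filter.2 ⟨(PySem.Set.mem_ofList _ _).2 h1, ?_⟩
    simpa using h2
  have hmemq : nb ∉ (PySem.Set.ofList rooms.flatten).filter (fun x => !(PySem.Set.contains (PySem.Set.add s nb) x)) := by
    intro hc
    simp at hc
  unfold pvUnvis
  rcases Nat.lt_or_ge _ _ with h | h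
  · exact h
  · exfalso
    have := hsub.eq_of_length (Nat.le_antisymm hsub.length_le h)
    rw [this] at hmemq
    exact hmemq hmemp

-- one pass of A's inner for-loop over the current room's keys
def bfsStep (visited : PySem.Set Int) (rest : List Int) (row : List Int) :
    PySem.Set Int × List Int :=
  row.foldl (fun st nb =>
    if PySem.Set.contains st.1 nb then st else (PySem.Set.add st.1 nb, st.2 ++ [nb]))
    (visited, rest)

lemma bfsStep_cons (visited : PySem.Set Int) (rest : List Int) (nb : Int) (row : List Int) :
    bfsStep visited rest (nb :: row) =
      if nb ∈ visited then bfsStep visited rest row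
      else bfsStep (PySem.Set.add visited nb) (rest ++ [nb]) row := by
  simp only [bfsStep, List.foldl_cons]
  by_cases h : nb ∈ visited
  · simp [h]
  · simp [h]

lemma bfsStep_measure (rooms : List (List Int)) :
    ∀ (row : List Int) (visited : PySem.Set Int) (rest : List Int),
      (∀ nb ∈ row, nb ∈ rooms.flatten) →
      2 * pvUnvis rooms (bfsStep visited rest row).1 + (bfsStep visited rest row).2.length ≤
        2 * pvUnvis rooms visited + rest.length := by
  intro row
  induction row with
  | nil => intro visited rest _; simp [bfsStep]
  | cons nb row ih =>
    intro visited rest hfl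
    rw [bfsStep_cons]
    by_cases h : nb ∈ visited
    · rw [if_pos h]
      exact ih visited rest (fun x hx => hfl x (List.mem_cons.2 (Or.inr hx)))
    · rw [if_neg h]
      have h1 := ih (PySem.Set.add visited nb) (rest ++ [nb])
        (fun x hx => hfl x (List.mem_cons.2 (Or.inr hx)))
      have h2 := pvUnvis_add_lt rooms visited nb (hfl nb (List.mem_cons.2 (Or.inl rfl))) h
      simp only [List.length_append, List.length_cons, List.length_nil] at *
      omega

def bfsLoop (rooms : List (List Int)) (visited : PySem.Set Int) (queue : List Int) :
    PySem.Set Int :=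
  match queue with
  | [] => visited
  | idx :: rest =>
    match h : PySem.List.pyGet? rooms idx with
    | none => bfsLoop rooms visited rest   -- Python raises IndexError here (value unconstrained where Python raises); the port skips the keyless room
    | some row => bfsLoop rooms (bfsStep visited rest row).1 (bfsStep visited rest row).2
termination_by 2 * pvUnvis rooms visited + queue.length
decreasing_by
  · simp only [List.length_cons]
    omega
  · have hrow : ∀ nb ∈ row, nb ∈ rooms.flatten := by
      intro nb hnb
      exact List.mem_flatten.2 ⟨row, PySem.List.mem_of_pyGet?_eq_some rooms h, hnb⟩
    have := bfsStep_measure rooms row visited rest hrow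
    simp only [List.length_cons]
    omega

def canVisitAllRooms (rooms : List (List Int)) : Bool :=
  (bfsLoop rooms (PySem.Set.ofList [0]) [0]).length == rooms.length

-- ===== PORT B =====
-- the set comprehension {k for i in frontier for k in rooms[i] if k not in visited}
def frontierNext (rooms : List (List Int)) (visited frontier : PySem.Set Int) :
    PySem.Set Int :=
  frontier.foldl (fun acc i =>
    match PySem.List.pyGet? rooms i with
    | none => acc   -- Python raises IndexError here (value unconstrained where Python raises); the port skips the keyless room
    | some row => PySem.Set.update acc (row.filter (fun k => !(PySem.Set.contains visited k))))
    PySem.Set.empty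

lemma frontierNext_fold_mem (rooms : List (List Int)) (visited : PySem.Set Int) (x : Int) :
    ∀ (l : List Int) (acc : PySem.Set Int),
      (x ∈ l.foldl (fun acc i =>
        match PySem.List.pyGet? rooms i with
        | none => acc
        | some row => PySem.Set.update acc (row.filter (fun k => !(PySem.Set.contains visited k)))) acc
      ↔ x ∈ acc ∨ ((∃ i ∈ l, pvEdge rooms i x) ∧ x ∉ visited)) := by
  intro l
  induction l with
  | nil => simp
  | cons i l ih =>
    intro acc
    rw [List.foldl_cons, ih]
    cases hg : PySem.List.pyGet? rooms i with
    | none =>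
      constructor
      · rintro (hx | hx)
        · exact Or.inl hx
        · exact Or.inr ⟨⟨hx.1.choose, List.mem_cons.2 (Or.inr hx.1.choose_spec.1), hx.1.choose_spec.2⟩, hx.2⟩
      · rintro (hx | ⟨⟨j, hj, hje⟩, hxv⟩)
        · exact Or.inl hx
        · rcases List.mem_cons.1 hj with rfl | hj
          · obtain ⟨row, hrow, _⟩ := hje
            rw [hg] at hrow; cases hrow
          · exact Or.inr ⟨⟨j, hj, hje⟩, hxv⟩
    | some row =>
      have hup : x ∈ PySem.Set.update acc (row.filter (fun k => !(PySem.Set.contains visited k))) ↔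
          x ∈ acc ∨ (x ∈ row ∧ x ∉ visited) := by
        rw [PySem.Set.mem_update]
        constructor
        · rintro (hx | hx)
          · exact Or.inl hx
          · have := List.mem_filter.1 hx
            refine Or.inr ⟨this.1, ?_⟩
            have h2 := this.2
            simpa using h2
        · rintro (hx | ⟨hx1, hx2⟩)
          · exact Or.inl hx
          · exact Or.inr (List.mem_filter.2 ⟨hx1, by simpa using hx2⟩)
      rw [hup]
      constructor
      · rintro ((hx | ⟨hx1, hx2⟩) | ⟨⟨j, hj, hje⟩, hxv⟩)
        · exact Or.inl hx
        · exact Or.inr ⟨⟨i, List.mem_cons.2 (Or.inl rfl), ⟨row, hg, hx1⟩⟩, hx2⟩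
        · exact Or.inr ⟨⟨j, List.mem_cons.2 (Or.inr hj), hje⟩, hxv⟩
      · rintro (hx | ⟨⟨j, hj, hje⟩, hxv⟩)
        · exact Or.inl (Or.inl hx)
        · rcases List.mem_cons.1 hj with rfl | hj
          · obtain ⟨row', hrow', hxr⟩ := hje
            rw [hg] at hrow'
            cases hrow'
            exact Or.inl (Or.inr ⟨hxr, hxv⟩)
          · exact Or.inr ⟨⟨j, hj, hje⟩, hxv⟩

lemma frontierNext_mem (rooms : List (List Int)) (visited frontier : PySem.Set Int) (x : Int) :
    x ∈ frontierNext rooms visited frontier ↔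
      (∃ i ∈ frontier, pvEdge rooms i x) ∧ x ∉ visited := by
  unfold frontierNext
  rw [frontierNext_fold_mem]
  simp [PySem.Set.empty]

def levelLoop (rooms : List (List Int)) (visited frontier : PySem.Set Int) :
    PySem.Set Int :=
  if frontier.isEmpty then visited
  else
    let fr := frontierNext rooms visited frontier
    levelLoop rooms (PySem.Set.update visited fr) fr
termination_by 2 * pvUnvis rooms visited + (if frontier.isEmpty then 0 else 1)
decreasing_by
  by_cases hfr : (frontierNext rooms visited frontier).isEmpty
  · have hnil : frontierNext rooms visited frontier = [] := List.isEmpty_iff.1 hfr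
    simp only [fr, hnil, PySem.Set.update_nil]
    simp_all
  · obtain ⟨x, hx⟩ := List.exists_mem_of_ne_nil _ (by simpa [List.isEmpty_iff] using hfr)
    obtain ⟨⟨i, _, row, hrow, hxr⟩, hxv⟩ := (frontierNext_mem rooms visited frontier x).1 hx
    have hxfl : x ∈ rooms.flatten :=
      List.mem_flatten.2 ⟨row, PySem.List.mem_of_pyGet?_eq_some rooms hrow, hxr⟩
    have h1 : pvUnvis rooms (PySem.Set.update visited (frontierNext rooms visited frontier)) ≤
        pvUnvis rooms (PySem.Set.add visited x) := by
      apply pvUnvis_mono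
      intro y hy
      rcases (PySem.Set.mem_add _ _ _).1 hy with hy | hy
      · exact (PySem.Set.mem_update _ _ _).2 (Or.inl hy)
      · exact (PySem.Set.mem_update _ _ _).2 (Or.inr (hy ▸ hx))
    have h2 := pvUnvis_add_lt rooms visited x hxfl hxv
    have h3 : (if (frontierNext rooms visited frontier).isEmpty then 0 else 1) ≤ 1 := by
      split <;> omega
    omega

def canVisitAllRooms_alt (rooms : List (List Int)) : Bool :=
  (levelLoop rooms (PySem.Set.ofList [0]) (PySem.Set.ofList [0])).length == rooms.length

-- ===== PRECONDITION & SPEC =====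
-- Pre_ is exactly the inputs on which A returns (A raises IndexError on the empty list and whenever a key
-- outside [-len(rooms), len(rooms)) is reachable from room 0): it asks for a certificate set S of room
-- indices containing room 0, closed under the key graph (with Python's negative-index wrap), all of whose
-- rooms carry only wrap-in-range keys.  The ports are total, so the proof holds on (and beyond) all of Pre_.
def Pre_canVisitAllRooms (rooms : List (List Int)) : Prop :=
  rooms ≠ [] ∧
  ∃ S ∈ (Finset.range rooms.length).powerset, 0 ∈ S ∧
    ∀ i ∈ S, ∀ k ∈ rooms.getD i [],
      -(rooms.length : Int) ≤ k ∧ k < (rooms.length : Int) ∧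
      (if k < 0 then k + (rooms.length : Int) else k).toNat ∈ S
instance (rooms : List (List Int)) : Decidable (Pre_canVisitAllRooms rooms) := by
  unfold Pre_canVisitAllRooms; infer_instance

def pvWitness_canVisitAllRooms : List (List Int) := [[1], [0]]

def Spec_canVisitAllRooms (rooms : List (List Int)) (out : Bool) : Prop := out = canVisitAllRooms_alt rooms
instance (rooms : List (List Int)) (out : Bool) : Decidable (Spec_canVisitAllRooms rooms out) := by unfold Spec_canVisitAllRooms; infer_instance

-- ===== CLAIM (what is proved, stated in full; the proofs are below) =====
def Claim_equal_canVisitAllRooms : Prop := ∀ (rooms : List (List Int)), Dom_canVisitAllRooms rooms → Pre_canVisitAllRooms rooms → Spec_canVisitAllRooms rooms (canVisitAllRooms rooms)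

-- ===== LEMMAS AND PROOFS =====

-- reachability from room 0 along the key graph
def pvReach (rooms : List (List Int)) : Int → Prop :=
  Relation.ReflTransGen (pvEdge rooms) 0

lemma pvReach_subset (rooms : List (List Int)) (S : List Int)
    (h0 : (0 : Int) ∈ S)
    (hcl : ∀ x ∈ S, ∀ j, pvEdge rooms x j → j ∈ S) :
    ∀ y, pvReach rooms y → y ∈ S := by
  intro y hy
  induction hy with
  | refl => exact h0
  | tail _ e ih => exact hcl _ ih _ e

lemma bfsStep_fst_mem (visited : PySem.Set Int) (rest row : List Int) (x : Int) :
    x ∈ (bfsStep visited rest row).1 ↔ x ∈ visited ∨ x ∈ row := by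
  induction row generalizing visited rest with
  | nil => simp [bfsStep]
  | cons nb row ih =>
    rw [bfsStep_cons]
    by_cases h : nb ∈ visited
    · rw [if_pos h, ih]
      constructor
      · rintro (hx | hx)
        · exact Or.inl hx
        · exact Or.inr (List.mem_cons.2 (Or.inr hx))
      · rintro (hx | hx)
        · exact Or.inl hx
        · rcases List.mem_cons.1 hx with rfl | hx
          · exact Or.inl h
          · exact Or.inr hx
    · rw [if_neg h, ih]
      simp [PySem.Set.mem_add]
      tauto

lemma bfsStep_snd_mem (visited : PySem.Set Int) (rest row : List Int) (x : Int) :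
    x ∈ (bfsStep visited rest row).2 ↔ x ∈ rest ∨ (x ∈ row ∧ x ∉ visited) := by
  induction row generalizing visited rest with
  | nil => simp [bfsStep]
  | cons nb row ih =>
    rw [bfsStep_cons]
    by_cases h : nb ∈ visited
    · rw [if_pos h, ih]
      constructor
      · rintro (hx | ⟨hx1, hx2⟩)
        · exact Or.inl hx
        · exact Or.inr ⟨List.mem_cons.2 (Or.inr hx1), hx2⟩
      · rintro (hx | ⟨hx1, hx2⟩)
        · exact Or.inl hx
        · rcases List.mem_cons.1 hx1 with rfl | hx1
          · exact absurd h hx2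
          · exact Or.inr ⟨hx1, hx2⟩
    · rw [if_neg h, ih]
      simp [PySem.Set.mem_add, List.mem_append]
      constructor
      · rintro ((hx | rfl) | ⟨hx1, hx2, hx3⟩)
        · exact Or.inl hx
        · exact Or.inr ⟨Or.inl rfl, h⟩
        · exact Or.inr ⟨Or.inr hx1, hx2⟩
      · rintro (hx | ⟨(rfl | hx1), hx2⟩)
        · exact Or.inl (Or.inl hx)
        · exact Or.inl (Or.inr rfl)
        · by_cases hxe : x = nb
          · exact Or.inl (Or.inr hxe)
          · exact Or.inr ⟨hx1, hx2, hxe⟩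

lemma bfsStep_fst_nodup (visited : PySem.Set Int) (rest row : List Int)
    (h : visited.Nodup) : (bfsStep visited rest row).1.Nodup := by
  induction row generalizing visited rest with
  | nil => simpa [bfsStep] using h
  | cons nb row ih =>
    rw [bfsStep_cons]
    by_cases hm : nb ∈ visited
    · rw [if_pos hm]; exact ih _ _ h
    · rw [if_neg hm]; exact ih _ _ (PySem.Set.nodup_add visited nb h)

-- characterization of A's loop
lemma bfs_char (rooms : List (List Int)) :
    ∀ (visited : PySem.Set Int) (queue : List Int),
      visited.Nodup →
      (∀ x ∈ queue, x ∈ visited) →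
      (∀ x ∈ visited, x ∉ queue → ∀ j, pvEdge rooms x j → j ∈ visited) →
      (∀ x ∈ visited, pvReach rooms x) →
      (bfsLoop rooms visited queue).Nodup ∧
      (∀ x ∈ visited, x ∈ bfsLoop rooms visited queue) ∧
      (∀ y ∈ bfsLoop rooms visited queue, pvReach rooms y) ∧
      (∀ x ∈ bfsLoop rooms visited queue, ∀ j, pvEdge rooms x j → j ∈ bfsLoop rooms visited queue) := by
  intro visited queue
  induction visited, queue using bfsLoop.induct rooms with
  | case1 visited =>
    intro hnd _ hcl h5
    simp only [bfsLoop]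
    exact ⟨hnd, fun x hx => hx, h5, fun x hx j he => hcl x hx (by simp) j he⟩
  | case2 visited idx rest hg ih =>
    intro hnd h2 hcl h5
    have h2' : ∀ x ∈ rest, x ∈ visited := fun x hx => h2 x (List.mem_cons.2 (Or.inr hx))
    have hcl' : ∀ x ∈ visited, x ∉ rest → ∀ j, pvEdge rooms x j → j ∈ visited := by
      intro x hxv hxr j he
      by_cases hxi : x = idx
      · subst hxi
        obtain ⟨row, hrow, _⟩ := he
        rw [hg] at hrow; cases hrow
      · refine hcl x hxv ?_ j he
        intro hc
        rcases List.mem_cons.1 hc with rfl | hc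
        · exact hxi rfl
        · exact hxr hc
    obtain ⟨c1, c2, c3, c4⟩ := ih hnd h2' hcl' h5
    have heq : bfsLoop rooms visited (idx :: rest) = bfsLoop rooms visited rest := by
      conv_lhs => rw [bfsLoop]
      split <;> simp_all
    rw [heq]
    exact ⟨c1, c2, c3, c4⟩
  | case3 visited idx rest row hg ih =>
    intro hnd h2 hcl h5
    have hrowmem : row ∈ rooms := PySem.List.mem_of_pyGet?_eq_some rooms hg
    have hidxv : idx ∈ visited := h2 idx (List.mem_cons.2 (Or.inl rfl))
    have hnd' := bfsStep_fst_nodup visited rest row hnd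
    have h2' : ∀ x ∈ (bfsStep visited rest row).2, x ∈ (bfsStep visited rest row).1 := by
      intro x hx
      rcases (bfsStep_snd_mem visited rest row x).1 hx with hx | hx
      · exact (bfsStep_fst_mem visited rest row x).2
          (Or.inl (h2 x (List.mem_cons.2 (Or.inr hx))))
      · exact (bfsStep_fst_mem visited rest row x).2 (Or.inr hx.1)
    have hcl' : ∀ x ∈ (bfsStep visited rest row).1, x ∉ (bfsStep visited rest row).2 →
        ∀ j, pvEdge rooms x j → j ∈ (bfsStep visited rest row).1 := by
      intro x hx hnx j he
      have hnx' := hnx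
      rw [bfsStep_snd_mem] at hnx'
      push Not at hnx'
      have hxv : x ∈ visited := by
        rcases (bfsStep_fst_mem visited rest row x).1 hx with hx1 | hx1
        · exact hx1
        · exact hnx'.2 hx1
      by_cases hxi : x = idx
      · subst hxi
        obtain ⟨row', hrow', hj⟩ := he
        rw [hg] at hrow'; cases hrow'
        exact (bfsStep_fst_mem visited rest row j).2 (Or.inr hj)
      · have : x ∉ idx :: rest := by
          intro hc
          rcases List.mem_cons.1 hc with rfl | hc
          · exact hxi rfl
          · exact hnx'.1 hc
        exact (bfsStep_fst_mem visited rest row j).2 (Or.inl (hcl x hxv this j he))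
    have h5' : ∀ x ∈ (bfsStep visited rest row).1, pvReach rooms x := by
      intro x hx
      rcases (bfsStep_fst_mem visited rest row x).1 hx with hx | hx
      · exact h5 x hx
      · exact Relation.ReflTransGen.tail (h5 idx hidxv) ⟨row, hg, hx⟩
    obtain ⟨c1, c2, c3, c4⟩ := ih hnd' h2' hcl' h5'
    have heq : bfsLoop rooms visited (idx :: rest) =
        bfsLoop rooms (bfsStep visited rest row).1 (bfsStep visited rest row).2 := by
      conv_lhs => rw [bfsLoop]
      split <;> simp_all
    rw [heq]
    exact ⟨c1, fun x hx => c2 x ((bfsStep_fst_mem visited rest row x).2 (Or.inl hx)), c3, c4⟩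

-- characterization of B's loop
lemma level_char (rooms : List (List Int)) :
    ∀ (visited frontier : PySem.Set Int),
      visited.Nodup →
      (∀ x ∈ frontier, x ∈ visited) →
      (∀ x ∈ visited, x ∉ frontier → ∀ j, pvEdge rooms x j → j ∈ visited) →
      (∀ x ∈ visited, pvReach rooms x) →
      (levelLoop rooms visited frontier).Nodup ∧
      (∀ x ∈ visited, x ∈ levelLoop rooms visited frontier) ∧
      (∀ y ∈ levelLoop rooms visited frontier, pvReach rooms y) ∧
      (∀ x ∈ levelLoop rooms visited frontier, ∀ j, pvEdge rooms x j → j ∈ levelLoop rooms visited frontier) := by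
  intro visited frontier
  induction visited, frontier using levelLoop.induct rooms with
  | case1 visited frontier hemp =>
    intro hnd _ hcl h5
    have hnil : frontier = [] := List.isEmpty_iff.1 hemp
    subst hnil
    have hres : levelLoop rooms visited [] = visited := by
      rw [levelLoop, if_pos hemp]
    rw [hres]
    exact ⟨hnd, fun x hx => hx, h5, fun x hx j he => hcl x hx (by simp) j he⟩
  | case2 visited frontier hemp fr ih =>
    intro hnd h2 hcl h5
    have hnd' := PySem.Set.nodup_update visited (frontierNext rooms visited frontier) hnd
    have h2' : ∀ x ∈ frontierNext rooms visited frontier,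
        x ∈ PySem.Set.update visited (frontierNext rooms visited frontier) := by
      intro x hx
      exact (PySem.Set.mem_update _ _ _).2 (Or.inr hx)
    have hcl' : ∀ x ∈ PySem.Set.update visited (frontierNext rooms visited frontier),
        x ∉ frontierNext rooms visited frontier →
        ∀ j, pvEdge rooms x j → j ∈ PySem.Set.update visited (frontierNext rooms visited frontier) := by
      intro x hx hnx j he
      have hxv : x ∈ visited := by
        rcases (PySem.Set.mem_update _ _ _).1 hx with hx | hx
        · exact hx
        · exact absurd hx hnx
      by_cases hxf : x ∈ frontier
      · by_cases hjv : j ∈ visited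
        · exact (PySem.Set.mem_update _ _ _).2 (Or.inl hjv)
        · exact (PySem.Set.mem_update _ _ _).2
            (Or.inr ((frontierNext_mem rooms visited frontier j).2 ⟨⟨x, hxf, he⟩, hjv⟩))
      · exact (PySem.Set.mem_update _ _ _).2 (Or.inl (hcl x hxv hxf j he))
    have h5' : ∀ x ∈ PySem.Set.update visited (frontierNext rooms visited frontier),
        pvReach rooms x := by
      intro x hx
      rcases (PySem.Set.mem_update _ _ _).1 hx with hx | hx
      · exact h5 x hx
      · obtain ⟨⟨i, hif, he⟩, _⟩ := (frontierNext_mem rooms visited frontier x).1 hx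
        exact Relation.ReflTransGen.tail (h5 i (h2 i hif)) he
    obtain ⟨c1, c2, c3, c4⟩ := ih hnd' h2' hcl' h5'
    have heq : levelLoop rooms visited frontier =
        levelLoop rooms (PySem.Set.update visited (frontierNext rooms visited frontier))
          (frontierNext rooms visited frontier) := by
      conv_lhs => rw [levelLoop]
      rw [if_neg hemp]
    rw [heq]
    exact ⟨c1, fun x hx => c2 x ((PySem.Set.mem_update _ _ _).2 (Or.inl hx)), c3, c4⟩

-- ===== VERDICT (by name: the statement is the Claim_ definition above) =====
theorem canVisitAllRooms_spec : Claim_equal_canVisitAllRooms := by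
  intro rooms _ _
  have hA := bfs_char rooms (PySem.Set.ofList [0]) [0]
    (PySem.Set.nodup_ofList _)
    (by intro x hx; simpa using hx)
    (by intro x hx hq; simp at hx hq; simp [hx] at hq)
    (by intro x hx; simp at hx; subst hx; exact Relation.ReflTransGen.refl)
  have hB := level_char rooms (PySem.Set.ofList [0]) (PySem.Set.ofList [0])
    (PySem.Set.nodup_ofList _)
    (by intro x hx; exact hx)
    (by intro x hx hq; exact absurd hx hq)
    (by intro x hx; simp [PySem.Set.ofList] at hx; subst hx; exact Relation.ReflTransGen.refl)
  obtain ⟨hAnd, hAsub, hAsound, hAcl⟩ := hA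
  obtain ⟨hBnd, hBsub, hBsound, hBcl⟩ := hB
  have h0A : (0 : Int) ∈ bfsLoop rooms (PySem.Set.ofList [0]) [0] := hAsub 0 (by simp)
  have h0B : (0 : Int) ∈ levelLoop rooms (PySem.Set.ofList [0]) (PySem.Set.ofList [0]) :=
    hBsub 0 (by simp [PySem.Set.ofList])
  have hmem : ∀ y, y ∈ bfsLoop rooms (PySem.Set.ofList [0]) [0] ↔
      y ∈ levelLoop rooms (PySem.Set.ofList [0]) (PySem.Set.ofList [0]) := by
    intro y
    constructor
    · intro hy; exact pvReach_subset rooms _ h0B hBcl y (hAsound y hy)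
    · intro hy; exact pvReach_subset rooms _ h0A hAcl y (hBsound y hy)
  have hperm : (bfsLoop rooms (PySem.Set.ofList [0]) [0]).Perm
      (levelLoop rooms (PySem.Set.ofList [0]) (PySem.Set.ofList [0])) :=
    (List.perm_ext_iff_of_nodup hAnd hBnd).2 hmem
  have hlens := hperm.length_eq
  unfold Spec_canVisitAllRooms canVisitAllRooms canVisitAllRooms_alt
  rw [hlens]
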